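-- pv_equiv track=rewrite | github.com/pdg137/adventofcode | prob03_1.py | get_num_positions
-- ===== SOURCE A (Python) =====
-- def isdigit(c):
--     return ord(c) >= ord("0") and ord(c) <= ord("9")
--
-- def get_num_positions(s):
--     start = -1
--     for i, c in enumerate(s):
--         if start == -1:
--             if isdigit(c):
--                 start = i
--         else:
--             if not isdigit(c):
--                 yield (start, i)
--                 start = -1
--     if start != -1:
--         yield (start, i+1)
-- ===== SOURCE B (Python) =====
-- def get_num_positions(s):
--     # Boundary-detection reformulation: mark digit positions, pair up the
--     # rising edges (run starts) with the falling edges (run ends) and zip.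
--     d = ['0' <= c <= '9' for c in s]
--     pairs = list(zip([False] + d, d + [False]))
--     starts = [i for i, (a, b) in enumerate(pairs) if b and not a]
--     ends = [i for i, (a, b) in enumerate(pairs) if a and not b]
--     yield from zip(starts, ends)
-- ===== Notes on version B (the rewrite author's own statement) =====
-- stated objective: alternative
-- what changed: Replaces A's explicit start/-1 state machine that yields runs inline with an edge-detection formulation: build the digit mask, extract rising-edge indices (run starts) and falling-edge indices (run ends) by two comprehensions over the same padded pair list, and zip them.
import Mathlib
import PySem

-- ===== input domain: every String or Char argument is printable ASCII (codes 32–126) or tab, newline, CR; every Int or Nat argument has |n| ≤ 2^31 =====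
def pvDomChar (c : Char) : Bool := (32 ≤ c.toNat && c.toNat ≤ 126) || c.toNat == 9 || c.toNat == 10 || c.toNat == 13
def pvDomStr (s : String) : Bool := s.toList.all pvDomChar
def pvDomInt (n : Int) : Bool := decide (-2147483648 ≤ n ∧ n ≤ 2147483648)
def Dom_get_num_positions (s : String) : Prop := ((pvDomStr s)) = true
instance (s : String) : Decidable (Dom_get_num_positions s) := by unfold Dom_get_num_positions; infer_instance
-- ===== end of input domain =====

-- B replaces A's start/-1 state machine by edge detection: mark digit positions,
-- collect rising/falling boundary indices with two comprehensions over the same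
-- padded pair list, and zip them (objective: alternative; return value only — A is a generator).

-- ===== PORT A =====
-- isdigit(c): ord-range test
def pyIsdigitA (c : Char) : Bool := decide (c.toNat ≥ 48) && decide (c.toNat ≤ 57)

-- the 'for i, c in enumerate(s)' loop with state (start, acc); at the base case
-- i is one past the last index, which equals the Python final yield's i+1
def gnpLoop : List Char → Int → Int → List (Int × Int) → List (Int × Int)
  | [], i, start, acc => if start ≠ -1 then acc ++ [(start, i)] else acc
  | c :: rest, i, start, acc =>
    if start = -1 then
      if pyIsdigitA c then gnpLoop rest (i + 1) i acc
      else gnpLoop rest (i + 1) start acc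
    else
      if !pyIsdigitA c then gnpLoop rest (i + 1) (-1) (acc ++ [(start, i)])
      else gnpLoop rest (i + 1) start acc

def get_num_positions (s : String) : List (Int × Int) := gnpLoop s.toList 0 (-1) []

-- ===== PORT B =====
-- '0' <= c <= '9'
def isdigB (c : Char) : Bool := decide ('0' ≤ c) && decide (c ≤ '9')

def get_num_positions_alt (s : String) : List (Int × Int) :=
  let d := s.toList.map isdigB
  let pairs := (false :: d).zip (d ++ [false])
  let starts := ((PySem.List.enumerate pairs).filter (fun ib => ib.2.2 && !ib.2.1)).map (fun ib => ib.1)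
  let ends := ((PySem.List.enumerate pairs).filter (fun ib => ib.2.1 && !ib.2.2)).map (fun ib => ib.1)
  starts.zip ends

-- ===== PRECONDITION & SPEC =====
def Spec_get_num_positions (s : String) (out : List (Int × Int)) : Prop := out = get_num_positions_alt s
instance (s : String) (out : List (Int × Int)) : Decidable (Spec_get_num_positions s out) := by unfold Spec_get_num_positions; infer_instance

-- ===== CLAIM (what is proved, stated in full; the proofs are below) =====
def Claim_equal_get_num_positions : Prop := ∀ (s : String), Dom_get_num_positions s → Spec_get_num_positions s (get_num_positions s)

-- ===== LEMMAS AND PROOFS =====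

theorem isdig_eq (c : Char) : pyIsdigitA c = isdigB c := by
  unfold pyIsdigitA isdigB
  congr 1

-- recursive shape of (prev :: d).zip (d ++ [false])
def pairsRec : Bool → List Bool → List (Bool × Bool)
  | prev, [] => [(prev, false)]
  | prev, b :: r => (prev, b) :: pairsRec b r

theorem pairs_eq : ∀ (d : List Bool) (prev : Bool),
    (prev :: d).zip (d ++ [false]) = pairsRec prev d := by
  intro d
  induction d with
  | nil => intro prev; simp [pairsRec]
  | cons b r ih => intro prev; simp [pairsRec, ← ih b]

-- recursive forms of the two boundary comprehensions
def sRec : Bool → List Bool → Int → List Int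
  | _, [], _ => []
  | prev, b :: r, i => (if b && !prev then [i] else []) ++ sRec b r (i + 1)

def eRec : Bool → List Bool → Int → List Int
  | prev, [], i => if prev then [i] else []
  | prev, b :: r, i => (if prev && !b then [i] else []) ++ eRec b r (i + 1)

theorem s_bridge : ∀ (d : List Bool) (prev : Bool) (i : Int),
    ((PySem.List.enumerate (pairsRec prev d) i).filter (fun ib => ib.2.2 && !ib.2.1)).map
        (fun ib => ib.1) = sRec prev d i := by
  intro d
  induction d with
  | nil =>
      intro prev i
      simp [pairsRec, sRec, PySem.List.enumerate_cons, PySem.List.enumerate_nil]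
  | cons b r ih =>
      intro prev i
      simp only [pairsRec, sRec, PySem.List.enumerate_cons, List.filter_cons]
      cases hb : (b && !prev) <;> simp [ih b (i + 1)]

theorem e_bridge : ∀ (d : List Bool) (prev : Bool) (i : Int),
    ((PySem.List.enumerate (pairsRec prev d) i).filter (fun ib => ib.2.1 && !ib.2.2)).map
        (fun ib => ib.1) = eRec prev d i := by
  intro d
  induction d with
  | nil =>
      intro prev i
      cases prev <;>
        simp [pairsRec, eRec, PySem.List.enumerate_cons, PySem.List.enumerate_nil]
  | cons b r ih =>
      intro prev i
      simp only [pairsRec, eRec, PySem.List.enumerate_cons, List.filter_cons]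
      cases hb : (prev && !b) <;> simp [ih b (i + 1)]

-- main invariant: A's loop equals the zip of boundary lists, in both loop states
theorem gnp_main : ∀ (l : List Char),
    (∀ (i : Int) (acc : List (Int × Int)), 0 ≤ i →
        gnpLoop l i (-1) acc
          = acc ++ (sRec false (l.map isdigB) i).zip (eRec false (l.map isdigB) i)) ∧
    (∀ (i st : Int) (acc : List (Int × Int)), 0 ≤ i → st ≠ -1 →
        gnpLoop l i st acc
          = acc ++ (st :: sRec true (l.map isdigB) i).zip (eRec true (l.map isdigB) i)) := by
  intro l
  induction l with
  | nil =>
      constructor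
      · intro i acc _; simp [gnpLoop, sRec, eRec]
      · intro i st acc _ hst; simp [gnpLoop, sRec, eRec, hst]
  | cons c r ih =>
      constructor
      · intro i acc hi
        have hd : pyIsdigitA c = isdigB c := isdig_eq c
        cases hb : isdigB c with
        | false =>
            simp only [gnpLoop, hd, hb, List.map_cons, sRec, eRec]
            simpa using ih.1 (i + 1) acc (by omega)
        | true =>
            simp only [gnpLoop, hd, hb, List.map_cons, sRec, eRec]
            have := ih.2 (i + 1) i acc (by omega) (by omega)
            simpa using this
      · intro i st acc hi hst
        have hd : pyIsdigitA c = isdigB c := isdig_eq c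
        cases hb : isdigB c with
        | false =>
            simp only [gnpLoop, if_neg hst, hd, hb, List.map_cons, sRec, eRec]
            have := ih.1 (i + 1) (acc ++ [(st, i)]) (by omega)
            simpa using this
        | true =>
            simp only [gnpLoop, if_neg hst, hd, hb, List.map_cons, sRec, eRec]
            have := ih.2 (i + 1) st acc (by omega) hst
            simpa using this

-- ===== VERDICT (by name: the statement is the Claim_ definition above) =====
theorem get_num_positions_spec : Claim_equal_get_num_positions := by
  intro s _
  unfold Spec_get_num_positions get_num_positions get_num_positions_alt
  simp only [pairs_eq, s_bridge, e_bridge]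
  simpa using (gnp_main s.toList).1 0 [] (by omega)
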